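-- pv_equiv track=rewrite | github.com/Ashi-s/coding_problems | DevPost/mapbox_unique.py | getMinimumUniqueSum
-- ===== SOURCE A (Python) =====
-- def getMinimumUniqueSum(arr):
--     # Write your code here
--     d = {}
--     for i in arr:
--         if i not in d:
--             d[i] = 1
--         else:
--             d[i] += 1
--     d = dict(sorted(d.items(),key = lambda x: x[0]))
--     return d
-- ===== SOURCE B (Python) =====
-- def getMinimumUniqueSum(arr):
--     # sort once, then scan runs of equal values; keys land in the dict in ascending order
--     d = {}
--     run_key = None
--     run_len = 0
--     for x in sorted(arr):
--         if run_len > 0 and x == run_key: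
--             run_len += 1
--         else:
--             if run_len > 0:
--                 d[run_key] = run_len
--             run_key = x
--             run_len = 1
--     if run_len > 0:
--         d[run_key] = run_len
--     return d
-- ===== Notes on version B (the rewrite author's own statement) =====
-- stated objective: alternative
-- what changed: A counts occurrences into a hash dict in input order and then sorts the dict's items by key; B sorts the input once and builds the result in a single scan over the sorted list, tracking the current run's key and length and inserting each finished run, so keys arrive already in ascending order and no sort of the items is needed.
import Mathlib
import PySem

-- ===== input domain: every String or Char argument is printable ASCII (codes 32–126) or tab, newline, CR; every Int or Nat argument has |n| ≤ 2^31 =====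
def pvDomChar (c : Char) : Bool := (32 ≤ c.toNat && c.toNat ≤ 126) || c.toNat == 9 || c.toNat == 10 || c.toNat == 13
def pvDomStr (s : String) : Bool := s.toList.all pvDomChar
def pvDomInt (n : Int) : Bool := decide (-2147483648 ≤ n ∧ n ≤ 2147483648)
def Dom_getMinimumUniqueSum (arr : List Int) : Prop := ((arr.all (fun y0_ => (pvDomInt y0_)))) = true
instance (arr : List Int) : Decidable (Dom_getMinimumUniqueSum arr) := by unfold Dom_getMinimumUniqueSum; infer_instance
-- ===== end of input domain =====

-- B replaces A's hash-count-then-sort-the-items by sort-the-input-once-then-scan-runs (alternative algorithm, same result).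

-- ===== PORT A =====
-- A: count occurrences into a dict in input order, then rebuild the dict from its items sorted by key.
def getMinimumUniqueSum (arr : List Int) : List (Int × Int) :=
  let d := arr.foldl
    (fun d i => if d.contains i = false then d.insert i 1 else d.modify i 0 (· + 1))
    PySem.Dict.empty
  (PySem.Dict.ofList (PySem.List.sorted d.items (fun x => x.1))).items

-- ===== PORT B =====
-- loop state: (result dict, current run as `some (run_key, run_len)`; `none` = run_len == 0)
def pvStepB (st : PySem.Dict Int Int × Option (Int × Int)) (x : Int) :
    PySem.Dict Int Int × Option (Int × Int) :=
  match st.2 with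
  | some (k, n) => if x = k then (st.1, some (k, n + 1)) else (st.1.insert k n, some (x, 1))
  | none => (st.1, some (x, 1))

-- the final `if run_len > 0: d[run_key] = run_len`
def pvFlushB (st : PySem.Dict Int Int × Option (Int × Int)) : PySem.Dict Int Int :=
  match st.2 with
  | some (k, n) => st.1.insert k n
  | none => st.1

def getMinimumUniqueSum_alt (arr : List Int) : List (Int × Int) :=
  (pvFlushB ((PySem.List.sorted arr (fun x => x)).foldl pvStepB (PySem.Dict.empty, none))).items

-- ===== PRECONDITION & SPEC =====
def Spec_getMinimumUniqueSum (arr : List Int) (out : List (Int × Int)) : Prop := out = getMinimumUniqueSum_alt arr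
instance (arr : List Int) (out : List (Int × Int)) : Decidable (Spec_getMinimumUniqueSum arr out) := by unfold Spec_getMinimumUniqueSum; infer_instance

-- ===== CLAIM (what is proved, stated in full; the proofs are below) =====
def Claim_equal_getMinimumUniqueSum : Prop := ∀ (arr : List Int), Dom_getMinimumUniqueSum arr → Spec_getMinimumUniqueSum arr (getMinimumUniqueSum arr)

-- ===== LEMMAS AND PROOFS =====

-- common reference value: distinct elements in first-occurrence order, each with its count
def pvRef (s : List Int) : List (Int × Int) :=
  (PySem.Set.ofList s).map (fun j => (j, (s.count j : Int)))

-- recursive description of B's run-scanning loop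
def pvRuns (k n : Int) : List Int → List (Int × Int)
  | [] => [(k, n)]
  | x :: t => if x = k then pvRuns k (n + 1) t else (k, n) :: pvRuns x 1 t

-- A's loop body is the counter step
lemma pvStepA_eq (d : PySem.Dict Int Int) (i : Int) :
    (if d.contains i = false then d.insert i 1 else d.modify i 0 (· + 1)) = d.modify i 0 (· + 1) := by
  by_cases h : d.contains i = false
  · simp [h, PySem.Dict.modify, PySem.Dict.getD_of_not_contains d _ h]
  · simp [h]

lemma pvDictA_eq (arr : List Int) :
    arr.foldl (fun d i => if d.contains i = false then d.insert i 1 else d.modify i 0 (· + 1))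
      PySem.Dict.empty = PySem.Dict.counter arr := by
  rw [PySem.Dict.counter_eq_foldl]
  exact PySem.List.foldl_congr_mem _ _ _ _ (fun acc x _ => pvStepA_eq acc x)

lemma pvOfList_sublist (l : List Int) : (PySem.Set.ofList l).Sublist l := by
  induction l with
  | nil => simp [PySem.Set.ofList_nil]
  | cons x t ih =>
    rw [PySem.Set.ofList_cons]
    exact List.Sublist.cons₂ x (List.filter_sublist.trans ih)

-- B's loop, run with a pending run (k, n) over a sorted suffix whose keys are all fresh in d
lemma pvLoopB (s : List Int) : ∀ (d : PySem.Dict Int Int) (k n : Int),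
    s.Pairwise (· ≤ ·) → (∀ y ∈ s, k ≤ y) → (∀ y, (y = k ∨ y ∈ s) → d.contains y = false) →
    (pvFlushB (s.foldl pvStepB (d, some (k, n)))).items = d.items ++ pvRuns k n s := by
  induction s with
  | nil =>
    intro d k n _ _ hf
    simp [pvFlushB, pvRuns, PySem.Dict.items_insert_of_not_contains d n (hf k (Or.inl rfl))]
  | cons x t ih =>
    intro d k n hp hk hf
    rw [List.foldl_cons]
    by_cases hx : x = k
    · subst hx
      have hst : pvStepB (d, some (x, n)) x = (d, some (x, n + 1)) := by simp [pvStepB]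
      rw [hst, ih d x (n + 1) hp.of_cons (fun y hy => (List.pairwise_cons.mp hp).1 y hy)
        (fun y hy => hf y (hy.imp_right (List.mem_cons_of_mem x)))]
      simp [pvRuns]
    · have hkx : k < x := lt_of_le_of_ne (hk x (List.mem_cons_self)) (Ne.symm hx)
      have hst : pvStepB (d, some (k, n)) x = (d.insert k n, some (x, 1)) := by
        simp [pvStepB, hx]
      have hxt : ∀ y ∈ t, x ≤ y := (List.pairwise_cons.mp hp).1
      have hfresh : ∀ y, (y = x ∨ y ∈ t) → (d.insert k n).contains y = false := by
        intro y hy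
        have hyx : x ≤ y := by
          rcases hy with rfl | hy
          · exact le_refl y
          · exact hxt y hy
        have hym : y ∈ x :: t := by
          rcases hy with rfl | hy
          · exact List.mem_cons_self
          · exact List.mem_cons_of_mem x hy
        have hyk : (y == k) = false := by simp; omega
        rw [PySem.Dict.contains_insert, hyk, hf y (Or.inr hym)]
        rfl
      rw [hst, ih (d.insert k n) x 1 hp.of_cons hxt hfresh,
        PySem.Dict.items_insert_of_not_contains d n (hf k (Or.inl rfl))]
      simp [pvRuns, hx]

-- the run scan over a sorted list, as head run + counted distinct tail
lemma pvMap_discard_count (x : Int) (t : List Int) :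
    ((PySem.Set.ofList t).discard x).map (fun j => (j, ((x :: t).count j : Int)))
      = ((PySem.Set.ofList t).discard x).map (fun j => (j, (t.count j : Int))) := by
  apply List.map_congr_left
  intro j hj
  have hjx : ¬ (x = j) := fun h => ((PySem.Set.mem_discard _ _ _).mp hj).2 h.symm
  simp [hjx]

lemma pvRuns_eq (t : List Int) : ∀ (k n : Int), t.Pairwise (· ≤ ·) → (∀ y ∈ t, k ≤ y) →
    pvRuns k n t =
      (k, n + (t.count k : Int)) ::
        ((PySem.Set.ofList t).discard k).map (fun j => (j, (t.count j : Int))) := by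
  induction t with
  | nil => intro k n _ _; simp [pvRuns, PySem.Set.ofList_nil, PySem.Set.discard]
  | cons x t ih =>
    intro k n hp hk
    by_cases hx : x = k
    · subst hx
      rw [show pvRuns x n (x :: t) = pvRuns x (n + 1) t by simp [pvRuns]]
      rw [ih x (n + 1) hp.of_cons (fun y hy => (List.pairwise_cons.mp hp).1 y hy)]
      have hset : (PySem.Set.ofList (x :: t)).discard x = (PySem.Set.ofList t).discard x := by
        rw [PySem.Set.ofList_cons]
        simp [PySem.Set.discard, List.filter_filter]
      rw [hset, pvMap_discard_count]
      have hcnt : (n + 1) + (t.count x : Int) = n + ((x :: t).count x : Int) := by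
        push_cast [List.count_cons_self]; ring
      rw [hcnt]
    · have hkx : k < x := lt_of_le_of_ne (hk x List.mem_cons_self) (Ne.symm hx)
      have hxt : ∀ y ∈ t, x ≤ y := (List.pairwise_cons.mp hp).1
      rw [show pvRuns k n (x :: t) = (k, n) :: pvRuns x 1 t by simp [pvRuns, hx]]
      rw [ih x 1 hp.of_cons hxt]
      have hknot : k ∉ x :: t := by
        intro h
        rcases List.mem_cons.mp h with h1 | h2
        · exact hx h1.symm
        · exact absurd (hxt k h2) (by omega)
      have hc0 : List.count k (x :: t) = 0 := List.count_eq_zero.mpr hknot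
      have hset : (PySem.Set.ofList (x :: t)).discard k = x :: (PySem.Set.ofList t).discard x := by
        rw [PySem.Set.ofList_cons]
        simp only [PySem.Set.discard]
        apply List.filter_eq_self.mpr
        intro j hj
        have hjk : j ≠ k := by
          rcases List.mem_cons.mp hj with rfl | hj2
          · exact hx
          · have hjt : j ∈ t :=
              (PySem.Set.mem_ofList t j).mp ((PySem.Set.mem_discard _ _ _).mp hj2).1
            have := hxt j hjt; omega
        simp [hjk]
      rw [hc0, hset, List.map_cons, pvMap_discard_count]
      have h1 : ((x :: t).count x : Int) = 1 + (t.count x : Int) := by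
        push_cast [List.count_cons_self]; ring
      rw [h1]
      norm_num

lemma pvB_eq_ref (arr : List Int) :
    getMinimumUniqueSum_alt arr = pvRef (PySem.List.sorted arr (fun x => x)) := by
  have hp : (PySem.List.sorted arr (fun x => x)).Pairwise (· ≤ ·) := by
    simpa using PySem.List.sorted_pairwise arr (fun x => x)
  cases hs : PySem.List.sorted arr (fun x => x) with
  | nil =>
    simp [getMinimumUniqueSum_alt, hs, pvRef, pvFlushB, PySem.Set.ofList_nil, PySem.Dict.empty]
  | cons x t =>
    rw [hs] at hp
    unfold getMinimumUniqueSum_alt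
    rw [hs, List.foldl_cons,
      show pvStepB (PySem.Dict.empty, none) x = (PySem.Dict.empty, some (x, 1)) from rfl,
      pvLoopB t PySem.Dict.empty x 1 hp.of_cons (List.pairwise_cons.mp hp).1
        (fun y _ => PySem.Dict.contains_empty y),
      pvRuns_eq t x 1 hp.of_cons (List.pairwise_cons.mp hp).1]
    rw [pvRef, PySem.Set.ofList_cons, List.map_cons, pvMap_discard_count]
    have h1 : ((x :: t).count x : Int) = 1 + (t.count x : Int) := by
      push_cast [List.count_cons_self]; ring
    rw [h1]
    simp [PySem.Dict.empty]

lemma pvA_eq_ref (arr : List Int) :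
    getMinimumUniqueSum arr = pvRef (PySem.List.sorted arr (fun x => x)) := by
  show (PySem.Dict.ofList (PySem.List.sorted
      (arr.foldl (fun d i => if d.contains i = false then d.insert i 1 else d.modify i 0 (· + 1))
        PySem.Dict.empty).items (fun x => x.1))).items
    = pvRef (PySem.List.sorted arr (fun x => x))
  rw [pvDictA_eq, PySem.Dict.items_counter]
  set s := PySem.List.sorted arr (fun x => x) with hs
  have hp : s.Pairwise (· ≤ ·) := by
    rw [hs]; simpa using PySem.List.sorted_pairwise arr (fun x => x)
  have hperm : s.Perm arr := by rw [hs]; exact PySem.List.sorted_perm arr _ _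
  have hrefcnt : (fun j : Int => (j, (s.count j : Int))) = (fun j : Int => (j, (arr.count j : Int))) := by
    funext j; rw [hperm.count_eq j]
  have hsetperm : (PySem.Set.ofList s).Perm (PySem.Set.ofList arr) := by
    apply List.perm_of_nodup_nodup_toFinset_eq (PySem.Set.nodup_ofList s) (PySem.Set.nodup_ofList arr)
    ext j
    simp [PySem.Set.mem_ofList, hperm.mem_iff]
  have hlt : (PySem.Set.ofList s).Pairwise (· < ·) := by
    have hle : (PySem.Set.ofList s).Pairwise (· ≤ ·) := hp.sublist (pvOfList_sublist s)
    have hne : (PySem.Set.ofList s).Pairwise (· ≠ ·) := PySem.Set.nodup_ofList s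
    exact (hle.and hne).imp (fun h => lt_of_le_of_ne h.1 h.2)
  have hsorted : PySem.List.sorted
      ((PySem.Set.ofList arr).map (fun k => (k, (arr.count k : Int)))) (fun x => x.1) = pvRef s := by
    apply PySem.List.sorted_eq_of_perm_of_pairwise_lt
    · rw [pvRef, hrefcnt]
      exact hsetperm.map _
    · rw [pvRef, List.pairwise_map]
      exact hlt
  rw [hsorted]
  -- dict(...) rebuilt from the sorted items: keys are distinct, so the items are unchanged
  have hnodup : (List.map Prod.fst (pvRef s)).Nodup := by
    have heq : List.map Prod.fst (pvRef s) = PySem.Set.ofList s := by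
      simp [pvRef, List.map_map, Function.comp_def]
    rw [heq]; exact PySem.Set.nodup_ofList s
  have h := PySem.Dict.items_foldl_insert_fresh (pvRef s) Prod.fst Prod.snd PySem.Dict.empty
    (fun a _ => PySem.Dict.contains_empty _) hnodup
  simpa [PySem.Dict.ofList, PySem.Dict.update, PySem.Dict.empty] using h

-- ===== VERDICT (by name: the statement is the Claim_ definition above) =====
theorem getMinimumUniqueSum_spec : Claim_equal_getMinimumUniqueSum := by
  intro arr _
  unfold Spec_getMinimumUniqueSum
  rw [pvA_eq_ref, pvB_eq_ref]
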